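-- pv_equiv track=rewrite | github.com/lf-lang/playground-lingua-franca | experimental/C/src/Composition/AllToAllConnections/Interleaved/experiments.py | stride_sorted
-- ===== SOURCE A (Python) =====
-- def sorted(s):
--     stride = len(s) // 4
--     return s[0:stride] + s[2*stride:3*stride] + s[stride:2*stride] + s[3*stride:]
--
-- def stride_sorted(s, stride):
--     segment_length = stride * 4
--     return sum(
--         [
--             sorted(s[i:j]) for i, j in
--             zip(range(0, len(s), segment_length), range(segment_length, len(s) + 1, segment_length))
--         ], []
--     )
-- ===== SOURCE B (Python) =====
-- def stride_sorted(s, stride):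
--     # Two-phase: build the permutation index list, then map it over s.
--     order = []
--     for base in range(0, len(s) - 4 * stride + 1, 4 * stride):
--         order.extend(range(base, base + stride))
--         order.extend(range(base + 2 * stride, base + 3 * stride))
--         order.extend(range(base + stride, base + 2 * stride))
--         order.extend(range(base + 3 * stride, base + 4 * stride))
--     return [s[i] for i in order]
-- ===== Notes on version B (the rewrite author's own statement) =====
-- stated objective: alternative
-- what changed: B builds a permutation index list (one base loop over complete segments appending four index ranges) and then maps it over s in a single comprehension, instead of A's zip-of-ranges slicing each segment and re-slicing it inside a helper.
import Mathlib
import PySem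

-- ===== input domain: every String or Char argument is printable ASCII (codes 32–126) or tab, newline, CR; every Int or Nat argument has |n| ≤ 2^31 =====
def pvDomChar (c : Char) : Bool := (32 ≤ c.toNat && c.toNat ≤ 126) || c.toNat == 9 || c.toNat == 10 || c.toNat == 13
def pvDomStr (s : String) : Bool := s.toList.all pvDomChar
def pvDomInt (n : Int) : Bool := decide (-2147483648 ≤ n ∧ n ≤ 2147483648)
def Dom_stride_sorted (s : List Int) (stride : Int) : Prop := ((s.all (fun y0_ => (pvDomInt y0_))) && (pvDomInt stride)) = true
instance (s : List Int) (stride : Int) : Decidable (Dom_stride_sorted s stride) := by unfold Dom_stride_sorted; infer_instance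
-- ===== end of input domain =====

-- B builds a permutation index list then maps it over s, instead of A's zip-of-ranges slice-and-concatenate; alternative decomposition, same cost.


-- ===== PORT A =====
-- module-level helper `sorted` of A (shadows the builtin in the Python source)
def pySorted (s : List Int) : List Int :=
  let stride := PySem.Int.floordiv (PySem.List.len s) 4
  PySem.List.slice s (some 0) (some stride)
    ++ PySem.List.slice s (some (2 * stride)) (some (3 * stride))
    ++ PySem.List.slice s (some stride) (some (2 * stride))
    ++ PySem.List.slice s (some (3 * stride)) none

def stride_sorted (s : List Int) (stride : Int) : List Int :=
  let segmentLength := stride * 4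
  (((PySem.List.pyRange 0 (PySem.List.len s) segmentLength).zip
      (PySem.List.pyRange segmentLength (PySem.List.len s + 1) segmentLength)).map
    (fun ij => pySorted (PySem.List.slice s (some ij.1) (some ij.2)))).foldl (· ++ ·) []

-- ===== PORT B =====
def stride_sorted_alt (s : List Int) (stride : Int) : List Int :=
  let order := (PySem.List.pyRange 0 (PySem.List.len s - 4 * stride + 1) (4 * stride)).foldl
    (fun order base =>
      (((order ++ PySem.List.pyRange base (base + stride) 1)
        ++ PySem.List.pyRange (base + 2 * stride) (base + 3 * stride) 1)
        ++ PySem.List.pyRange (base + stride) (base + 2 * stride) 1)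
        ++ PySem.List.pyRange (base + 3 * stride) (base + 4 * stride) 1) []
  -- s[i]: every i in order is in range, so pyGetD is exact here
  order.map (fun i => PySem.List.pyGetD s i 0)

-- ===== PRECONDITION & SPEC =====
-- stride == 0 makes range(..., 0) raise ValueError in both A and B; excluded.
def Pre_stride_sorted (s : List Int) (stride : Int) : Prop := stride ≠ 0
instance (s : List Int) (stride : Int) : Decidable (Pre_stride_sorted s stride) := by unfold Pre_stride_sorted; infer_instance
def pvWitness_stride_sorted : List Int × Int := ([1, 2, 3, 4, 5], 1)

def Spec_stride_sorted (s : List Int) (stride : Int) (out : List Int) : Prop := out = stride_sorted_alt s stride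
instance (s : List Int) (stride : Int) (out : List Int) : Decidable (Spec_stride_sorted s stride out) := by unfold Spec_stride_sorted; infer_instance

-- ===== CLAIM (what is proved, stated in full; the proofs are below) =====
def Claim_equal_stride_sorted : Prop := ∀ (s : List Int) (stride : Int), Dom_stride_sorted s stride → Pre_stride_sorted s stride → Spec_stride_sorted s stride (stride_sorted s stride)

-- ===== LEMMAS AND PROOFS =====

-- shared normal form: for stride = ↑σ > 0, both programs compute the
-- concatenation over the K = len/(4σ) complete segments of the quarter-swapped segment
def segQ (s : List Int) (σ base : Nat) : List Int :=
  ((s.drop base).take σ) ++ ((s.drop (base + 2 * σ)).take σ)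
    ++ ((s.drop (base + σ)).take σ) ++ ((s.drop (base + 3 * σ)).take σ)

def nf (s : List Int) (σ : Nat) : List Int :=
  ((List.range (s.length / (4 * σ))).map (fun j => segQ s σ (4 * σ * j))).flatten

lemma pyRange_neg_nil (a b step : Int) (hstep : step < 0) (hab : a ≤ b) :
    PySem.List.pyRange a b step = [] := by
  simp only [PySem.List.pyRange]
  rw [if_neg hstep.ne]
  have h1 : ¬ 0 < step := by omega
  have h2 : ¬ b < a := by omega
  simp [h1, h2]

lemma zip_map_range {α β : Type} (f : Nat → α) (g : Nat → β) (a b : Nat) :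
    ((List.range a).map f).zip ((List.range b).map g)
      = (List.range (min a b)).map (fun k => (f k, g k)) := by
  apply List.ext_getElem
  · simp
  · intro i h1 h2
    simp [List.getElem_zip]

lemma map_pyGetD_range (xs : List Int) (a m : Nat) (h : a + m ≤ xs.length) :
    (PySem.List.pyRange (a : Int) ((a + m : Nat) : Int) 1).map (fun i => PySem.List.pyGetD xs i 0)
      = (xs.drop a).take m := by
  rw [PySem.List.pyRange_one]
  have hm : (((a + m : Nat) : Int) - (a : Int)).toNat = m := by omega
  rw [hm, List.map_map]
  apply List.ext_getElem
  · simp; omega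
  · intro i h1 h2
    simp only [List.getElem_map, List.getElem_range, Function.comp_apply]
    rw [PySem.List.pyGetD_eq_getElem xs 0 (by positivity) (by simp at h1; omega)]
    simp only [List.getElem_take, List.getElem_drop]
    congr 1

lemma seg_A (s : List Int) (σ j : Nat) (hσ : 0 < σ) (hj : 4*σ*j + 4*σ ≤ s.length) :
    pySorted (PySem.List.slice s (some ((4*σ*j : Nat) : Int)) (some ((4*σ*j + 4*σ : Nat) : Int)))
      = segQ s σ (4*σ*j) := by
  rw [PySem.List.slice_natCast]
  rw [show 4*σ*j + 4*σ - 4*σ*j = 4*σ from by omega]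
  simp only [pySorted, segQ]
  have hlen : ((List.drop (4*σ*j) s).take (4*σ)).length = 4*σ := by
    simp; omega
  have hl : PySem.List.len ((List.drop (4*σ*j) s).take (4*σ)) = ((4*σ : Nat) : Int) := by
    simp [PySem.List.len, hlen]
  rw [hl]
  have hfd : PySem.Int.floordiv ((4*σ : Nat) : Int) 4 = ((σ:Nat):Int) := by
    rw [show (4:Int) = ((4:Nat):Int) from rfl, PySem.Int.floordiv_natCast]
    congr 1
    omega
  rw [hfd]
  rw [show (2 * ((σ:Nat):Int)) = ((2*σ : Nat) : Int) from by push_cast; ring,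
      show (3 * ((σ:Nat):Int)) = ((3*σ : Nat) : Int) from by push_cast; ring]
  rw [PySem.List.slice_from_natCast, PySem.List.slice_natCast, PySem.List.slice_natCast]
  simp only [PySem.List.slice_zero_start, PySem.List.slice_to_natCast]
  rw [show 3*σ - 2*σ = σ from by omega, show 2*σ - σ = σ from by omega]
  simp only [List.drop_take, List.drop_drop, List.take_take]
  rw [show min σ (4*σ) = σ from by omega, show min σ (4*σ - 2*σ) = σ from by omega,
      show min σ (4*σ - σ) = σ from by omega, show 4*σ - 3*σ = σ from by omega]

lemma foldl_app4 (f1 f2 f3 f4 : Int → List Int) (l : List Int) :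
    ∀ init, l.foldl (fun acc b => (((acc ++ f1 b) ++ f2 b) ++ f3 b) ++ f4 b) init
      = init ++ (l.map (fun b => ((f1 b ++ f2 b) ++ f3 b) ++ f4 b)).flatten := by
  induction l with
  | nil => simp
  | cons x xs ih => intro init; rw [List.foldl_cons, ih]; simp [List.append_assoc]

lemma seg_bound (n σ j : Nat) (hj : j < n / (4*σ)) : 4*σ*j + 4*σ ≤ n := by
  have h1 : (j+1) * (4*σ) ≤ (n / (4*σ)) * (4*σ) := Nat.mul_le_mul_right _ hj
  have h2 : (n / (4*σ)) * (4*σ) ≤ n := Nat.div_mul_le_self n (4*σ)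
  have h3 : (j+1) * (4*σ) = 4*σ*j + 4*σ := by ring
  omega

lemma A_neg (s : List Int) (stride : Int) (h : stride < 0) : stride_sorted s stride = [] := by
  simp only [stride_sorted, PySem.List.len]
  rw [pyRange_neg_nil 0 (s.length : Int) (stride * 4) (by omega)
        (by exact_mod_cast Int.natCast_nonneg s.length)]
  simp

lemma B_neg (s : List Int) (stride : Int) (h : stride < 0) : stride_sorted_alt s stride = [] := by
  simp only [stride_sorted_alt, PySem.List.len]
  rw [pyRange_neg_nil 0 ((s.length : Int) - 4 * stride + 1) (4 * stride) (by omega)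
        (by have := Int.natCast_nonneg s.length; omega)]
  simp

lemma A_pos (s : List Int) (stride : Int) (h : 0 < stride) :
    stride_sorted s stride = nf s stride.toNat := by
  lift stride to Nat using h.le with σ
  have hσ : 0 < σ := by exact_mod_cast h
  simp only [stride_sorted, PySem.List.len, Int.toNat_natCast]
  rw [show ((σ:Int) * 4) = ((4*σ : Nat) : Int) from by push_cast; ring]
  have hLpos : (0:Int) < ((4*σ : Nat) : Int) := by exact_mod_cast by omega
  rw [PySem.List.pyRange_of_pos 0 (s.length : Int) hLpos,
      PySem.List.pyRange_of_pos ((4*σ : Nat) : Int) ((s.length : Int) + 1) hLpos]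
  rw [zip_map_range]
  have hc2 : (if ((4*σ : Nat) : Int) < (s.length : Int) + 1
        then (((s.length : Int) + 1 - ((4*σ : Nat) : Int) + ((4*σ : Nat) : Int) - 1) / ((4*σ : Nat) : Int)).toNat
        else 0) = s.length / (4*σ) := by
    by_cases hLn : 4*σ ≤ s.length
    · rw [if_pos (by exact_mod_cast by omega)]
      rw [show ((s.length : Int) + 1 - ((4*σ : Nat) : Int) + ((4*σ : Nat) : Int) - 1) = (s.length : Int) from by ring]
      rw [← Int.natCast_div, Int.toNat_natCast]
    · rw [if_neg (by exact_mod_cast by omega)]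
      exact (Nat.div_eq_of_lt (by omega)).symm
  have hc1 : s.length / (4*σ) ≤ (if (0:Int) < (s.length : Int)
        then (((s.length : Int) - 0 + ((4*σ : Nat) : Int) - 1) / ((4*σ : Nat) : Int)).toNat
        else 0) := by
    by_cases hn : 0 < s.length
    · rw [if_pos (by exact_mod_cast hn)]
      have : (s.length : Int) / ((4*σ : Nat) : Int) ≤ ((s.length : Int) - 0 + ((4*σ : Nat) : Int) - 1) / ((4*σ : Nat) : Int) :=
        Int.ediv_le_ediv (by exact_mod_cast by omega) (by omega)
      have h3 := Int.toNat_le_toNat this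
      rw [← Int.natCast_div, Int.toNat_natCast] at h3
      exact h3
    · have : s.length = 0 := by omega
      simp [this]
  rw [hc2, min_eq_right hc1]
  rw [show (fun (x1 x2 : List Int) => x1 ++ x2) = (fun (acc : List Int) (x : List Int) => acc ++ id x) from rfl,
      PySem.List.foldl_append_eq_flatMap]
  simp only [List.nil_append, List.flatMap_id, List.map_map, nf]
  congr 1
  apply List.map_congr_left
  intro j hj
  simp only [List.mem_range] at hj
  simp only [Function.comp_apply, zero_add]
  rw [show (((4*σ : Nat) : Int) * (j : Nat)) = ((4*σ*j : Nat) : Int) from by push_cast; ring,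
      show (((4*σ : Nat) : Int) + ((4*σ*j : Nat) : Int)) = ((4*σ*j + 4*σ : Nat) : Int) from by push_cast; ring]
  exact seg_A s σ j hσ (seg_bound s.length σ j hj)

lemma B_pos (s : List Int) (stride : Int) (h : 0 < stride) :
    stride_sorted_alt s stride = nf s stride.toNat := by
  lift stride to Nat using h.le with σ
  have hσ : 0 < σ := by exact_mod_cast h
  simp only [stride_sorted_alt, PySem.List.len, Int.toNat_natCast]
  rw [show (4 * (σ:Int)) = ((4*σ : Nat) : Int) from by push_cast; ring]
  have hLpos : (0:Int) < ((4*σ : Nat) : Int) := by exact_mod_cast by omega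
  rw [PySem.List.pyRange_of_pos 0 ((s.length : Int) - ((4*σ : Nat) : Int) + 1) hLpos]
  have hc3 : (if (0:Int) < (s.length : Int) - ((4*σ : Nat) : Int) + 1
        then (((s.length : Int) - ((4*σ : Nat) : Int) + 1 - 0 + ((4*σ : Nat) : Int) - 1) / ((4*σ : Nat) : Int)).toNat
        else 0) = s.length / (4*σ) := by
    by_cases hLn : 4*σ ≤ s.length
    · rw [if_pos (show (0:Int) < (s.length : Int) - ((4*σ : Nat) : Int) + 1 from by push_cast; omega)]
      rw [show ((s.length : Int) - ((4*σ : Nat) : Int) + 1 - 0 + ((4*σ : Nat) : Int) - 1) = (s.length : Int) from by ring]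
      rw [← Int.natCast_div, Int.toNat_natCast]
    · rw [if_neg (show ¬ (0:Int) < (s.length : Int) - ((4*σ : Nat) : Int) + 1 from by push_cast; omega)]
      exact (Nat.div_eq_of_lt (by omega)).symm
  rw [hc3]
  rw [foldl_app4]
  rw [List.nil_append, List.map_flatten, List.map_map, List.map_map, nf]
  congr 1
  apply List.map_congr_left
  intro j hj
  simp only [List.mem_range] at hj
  have hb := seg_bound s.length σ j hj
  simp only [Function.comp_apply, zero_add]
  rw [show (((4*σ : Nat) : Int) * (j : Nat)) = ((4*σ*j : Nat) : Int) from by push_cast; ring]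
  rw [show (((4*σ*j : Nat) : Int) + (σ:Int)) = ((4*σ*j + σ : Nat) : Int) from by push_cast; ring,
      show (((4*σ*j : Nat) : Int) + 2 * (σ:Int)) = ((4*σ*j + σ + σ : Nat) : Int) from by push_cast; ring,
      show (((4*σ*j : Nat) : Int) + 3 * (σ:Int)) = ((4*σ*j + σ + σ + σ : Nat) : Int) from by push_cast; ring,
      show (((4*σ*j : Nat) : Int) + ((4*σ : Nat) : Int)) = ((4*σ*j + σ + σ + σ + σ : Nat) : Int) from by push_cast; ring]
  simp only [List.map_append]
  rw [map_pyGetD_range s (4*σ*j) σ (by omega),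
      map_pyGetD_range s (4*σ*j + σ + σ) σ (by omega),
      map_pyGetD_range s (4*σ*j + σ) σ (by omega),
      map_pyGetD_range s (4*σ*j + σ + σ + σ) σ (by omega)]
  simp only [segQ]
  rw [show 4*σ*j + 2*σ = 4*σ*j + σ + σ from by ring,
      show 4*σ*j + 3*σ = 4*σ*j + σ + σ + σ from by ring]

-- ===== VERDICT (by name: the statement is the Claim_ definition above) =====
theorem stride_sorted_spec : Claim_equal_stride_sorted := by
  intro s stride _ hpre
  unfold Spec_stride_sorted
  rcases lt_trichotomy stride 0 with h | h | h
  · rw [A_neg s stride h, B_neg s stride h]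
  · exact absurd h hpre
  · rw [A_pos s stride h, B_pos s stride h]
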